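-- pv_equiv track=rewrite | github.com/LLNL/FPChecker | tracing_tool/strace_module.py | isASupportedCompiler
-- ===== SOURCE A (Python) =====
-- SUPPORTED_COMPILERS = set([
--   'nvcc',
--   'c++',
--   'cc',
--   'gcc',
--   'g++',
--   'xlc',
--   'xlC',
--   'xlc++',
--   'xlc_r',
--   'xlc++_r',
--   'mpic',
--   'mpic++',
--   'mpicxx',
--   'mpicc',
--   'mpixlc',
--   'mpixlC',
--   'mpixlf',
--   'mpif77',
--   'mpif90',
--   'clang',
--   'clang++',
--   'gfortran',
--   'xlf',
--   'xlf-gpu',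
--   'xlf2003',
--   'xlf2003-gpu',
--   'xlf2003_r',
--   'xlf2003_r-gpu',
--   'xlf2008',
--   'xlf2008-gpu',
--   'xlf2008_r',
--   'xlf2008_r-gpu',
--   'xlf90',
--   'xlf90-gpu',
--   'xlf90_r',
--   'xlf90_r-gpu',
--   'xlf95',
--   'xlf95-gpu',
--   'xlf95_r',
--   'xlf95_r-gpu',
--   'xlf_r',
--   'xlf_r-gpu'
-- ])
--
-- SUPPORTED_TOOLS = set([
--   'ar',
--   'ranlib',
--   'bin2c'
-- ])
--
-- def isASupportedCompiler(line):
--   for compiler in SUPPORTED_COMPILERS: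
--     if line.endswith('/'+compiler): #or line == compiler:
--       return True
--
--   for tool in SUPPORTED_TOOLS:
--     if line.endswith('/'+tool):
--       return True
--
--   return False
-- ===== SOURCE B (Python) =====
-- # One forward pass over the line tracking the segment after the most recent '/',
-- # then a single membership test in one combined name set.
-- _NAMES = frozenset(
--     "nvcc c++ cc gcc g++ xlc xlC xlc++ xlc_r xlc++_r mpic mpic++ mpicxx mpicc "
--     "mpixlc mpixlC mpixlf mpif77 mpif90 clang clang++ gfortran xlf xlf-gpu "
--     "xlf2003 xlf2003-gpu xlf2003_r xlf2003_r-gpu xlf2008 xlf2008-gpu xlf2008_r "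
--     "xlf2008_r-gpu xlf90 xlf90-gpu xlf90_r xlf90_r-gpu xlf95 xlf95-gpu xlf95_r "
--     "xlf95_r-gpu xlf_r xlf_r-gpu ar ranlib bin2c".split())
--
-- def isASupportedCompiler(line):
--   seen_slash = False
--   buf = []
--   for ch in line:
--     if ch == '/':
--       seen_slash = True
--       buf = []
--     else:
--       buf.append(ch)
--   return seen_slash and ''.join(buf) in _NAMES
-- ===== Notes on version B (the rewrite author's own statement) =====
-- stated objective: alternative
-- what changed: Instead of scanning ~45 candidate names and testing line.endswith('/'+name) for each, B makes one forward pass over the line maintaining the segment after the most recent '/' (and whether a '/' was seen), then does a single membership lookup of that basename in one combined frozenset of all names.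
import Mathlib
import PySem

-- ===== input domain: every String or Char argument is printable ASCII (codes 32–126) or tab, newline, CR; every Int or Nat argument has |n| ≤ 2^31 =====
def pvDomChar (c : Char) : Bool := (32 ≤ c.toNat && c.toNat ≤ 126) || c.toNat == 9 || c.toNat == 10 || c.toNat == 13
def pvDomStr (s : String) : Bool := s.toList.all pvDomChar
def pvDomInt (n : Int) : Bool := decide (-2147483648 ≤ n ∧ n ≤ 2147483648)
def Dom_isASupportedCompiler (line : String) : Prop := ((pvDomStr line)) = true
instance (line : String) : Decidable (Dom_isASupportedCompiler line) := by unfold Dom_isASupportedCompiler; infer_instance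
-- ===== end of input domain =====

-- B replaces the ~45-candidate endswith loop by one forward pass tracking the segment after
-- the most recent '/', plus a single lookup in one combined name set (alternative; no speed claim).

-- ===== PORT A =====
-- the two module-level set literals (strings modelled as char lists)
def pvCompilerNames : PySem.Set (List Char) := PySem.Set.ofList
  ["nvcc".toList, "c++".toList, "cc".toList, "gcc".toList, "g++".toList, "xlc".toList,
   "xlC".toList, "xlc++".toList, "xlc_r".toList, "xlc++_r".toList, "mpic".toList,
   "mpic++".toList, "mpicxx".toList, "mpicc".toList, "mpixlc".toList, "mpixlC".toList,
   "mpixlf".toList, "mpif77".toList, "mpif90".toList, "clang".toList, "clang++".toList,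
   "gfortran".toList, "xlf".toList, "xlf-gpu".toList, "xlf2003".toList, "xlf2003-gpu".toList,
   "xlf2003_r".toList, "xlf2003_r-gpu".toList, "xlf2008".toList, "xlf2008-gpu".toList,
   "xlf2008_r".toList, "xlf2008_r-gpu".toList, "xlf90".toList, "xlf90-gpu".toList,
   "xlf90_r".toList, "xlf90_r-gpu".toList, "xlf95".toList, "xlf95-gpu".toList,
   "xlf95_r".toList, "xlf95_r-gpu".toList, "xlf_r".toList, "xlf_r-gpu".toList]

def pvToolNames : PySem.Set (List Char) := PySem.Set.ofList
  ["ar".toList, "ranlib".toList, "bin2c".toList]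

-- the early-returning for-loops over the sets are any-matches (a Bool, independent of set iteration order)
def isASupportedCompiler (line : String) : Bool :=
  (pvCompilerNames.any (fun compiler => PySem.Chars.endswith line.toList ('/' :: compiler))) ||
  (pvToolNames.any (fun tool => PySem.Chars.endswith line.toList ('/' :: tool)))

-- ===== PORT B =====
-- Source B's combined frozenset, built exactly as there: one space-separated literal, split
def pvAllNames : PySem.Set (List Char) := PySem.Set.ofList (PySem.Chars.split₀
  ("nvcc c++ cc gcc g++ xlc xlC xlc++ xlc_r xlc++_r mpic mpic++ mpicxx mpicc mpixlc mpixlC mpixlf mpif77 mpif90 clang clang++ gfortran xlf xlf-gpu xlf2003 xlf2003-gpu xlf2003_r xlf2003_r-gpu xlf2008 xlf2008-gpu xlf2008_r xlf2008_r-gpu xlf90 xlf90-gpu xlf90_r xlf90_r-gpu xlf95 xlf95-gpu xlf95_r xlf95_r-gpu xlf_r xlf_r-gpu ar ranlib bin2c").toList)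

-- the for-loop over the line's characters: state = (seen_slash, buf); ''.join(buf) stays a char list
def isASupportedCompiler_alt (line : String) : Bool :=
  let st := line.toList.foldl
    (fun (st : Bool × List Char) ch =>
      if ch = '/' then (true, ([] : List Char)) else (st.1, st.2 ++ [ch]))
    (false, [])
  st.1 && pvAllNames.contains st.2

-- ===== PRECONDITION & SPEC =====
def Spec_isASupportedCompiler (line : String) (out : Bool) : Prop := out = isASupportedCompiler_alt line
instance (line : String) (out : Bool) : Decidable (Spec_isASupportedCompiler line out) := by unfold Spec_isASupportedCompiler; infer_instance

-- ===== CLAIM (what is proved, stated in full; the proofs are below) =====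
def Claim_equal_isASupportedCompiler : Prop := ∀ (line : String), Dom_isASupportedCompiler line → Spec_isASupportedCompiler line (isASupportedCompiler line)

-- ===== LEMMAS AND PROOFS =====

-- "l ends with '/'+c" for a slash-free c is exactly "l contains '/' and its part after the last '/' equals c"
theorem pv_endswith_slash_eq (l c : List Char) (h : ('/' : Char) ∉ c) :
    PySem.Chars.endswith l ('/' :: c) =
      (l.contains '/' && ((l.reverse.takeWhile (fun ch => ch != '/')).reverse == c)) := by
  apply Bool.eq_iff_iff.mpr
  rw [PySem.Chars.endswith_iff]
  rw [← List.reverse_prefix]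
  simp only [Bool.and_eq_true, List.contains_eq_mem, decide_eq_true_eq, beq_iff_eq,
    List.reverse_eq_iff, List.reverse_cons]
  constructor
  · rintro ⟨t, ht⟩
    have hr : l.reverse = c.reverse ++ '/' :: t := by
      simpa using ht.symm
    constructor
    · have : ('/' : Char) ∈ l.reverse := by simp [hr]
      simpa using this
    · rw [hr, List.takeWhile_append_of_pos (by intro x hx; simp; rintro rfl; exact h (by simpa using hx))]
      simp
  · rintro ⟨hmem, htk⟩
    have hsplit := List.takeWhile_append_dropWhile (p := fun ch => ch != '/') (l := l.reverse)
    have hd : l.reverse.dropWhile (fun ch => ch != '/') ≠ [] := by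
      intro hnil
      rw [List.dropWhile_eq_nil_iff] at hnil
      have := hnil '/' (by simpa using hmem)
      simp at this
    obtain ⟨x, xs, hx⟩ := List.exists_cons_of_ne_nil hd
    have hxslash : x = '/' := by
      have := List.head_dropWhile_not (fun ch => ch != '/') (l := l.reverse) (by simp [hx])
      simpa [hx] using this
    refine ⟨xs, ?_⟩
    rw [← hsplit, htk, hx, hxslash]
    simp

-- fold the per-candidate fact through an any over a slash-free candidate list
theorem pv_any_endswith (l : List Char) (cands : List (List Char))
    (h : ∀ c ∈ cands, ('/' : Char) ∉ c) :
    cands.any (fun c => PySem.Chars.endswith l ('/' :: c)) =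
      (l.contains '/' && cands.contains ((l.reverse.takeWhile (fun ch => ch != '/')).reverse)) := by
  induction cands with
  | nil => simp
  | cons c rest ih =>
    rw [List.any_cons, ih (fun d hd => h d (List.mem_cons_of_mem c hd)),
      pv_endswith_slash_eq l c (h c (List.mem_cons_self))]
    cases hsl : l.contains '/' <;>
      simp [Bool.beq_eq_decide_eq, eq_comm]

-- B's forward loop computes exactly (line contains '/', text after the last '/')
theorem pv_foldl_basename (l : List Char) :
    l.foldl (fun (st : Bool × List Char) ch =>
        if ch = '/' then (true, ([] : List Char)) else (st.1, st.2 ++ [ch])) (false, []) =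
      (l.contains '/', (l.reverse.takeWhile (fun ch => ch != '/')).reverse) := by
  induction l using List.reverseRecOn with
  | nil => simp
  | append_singleton l a ih =>
    rw [List.foldl_append, ih]
    by_cases ha : a = '/'
    · subst ha; simp
    · have hne : (a != '/') = true := by simp [ha]
      simp [ha, hne, Ne.symm ha]

-- Source B's combined set is (as a concrete list) A's two sets concatenated
set_option maxRecDepth 40000 in
set_option maxHeartbeats 2000000 in
theorem pv_allNames_eq : pvAllNames = (pvCompilerNames ++ pvToolNames : List (List Char)) := by
  rfl

-- ===== VERDICT (by name: the statement is the Claim_ definition above) =====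
set_option maxRecDepth 8192 in
theorem isASupportedCompiler_spec : Claim_equal_isASupportedCompiler := by
  intro line _
  unfold Spec_isASupportedCompiler isASupportedCompiler isASupportedCompiler_alt
  rw [pv_any_endswith line.toList pvCompilerNames (by decide),
      pv_any_endswith line.toList pvToolNames (by decide),
      pv_foldl_basename, pv_allNames_eq]
  simp [PySem.Set.contains, List.contains_eq_mem, List.mem_append, Bool.and_or_distrib_left]
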